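-- pv_equiv track=rewrite | github.com/mik11231/python | advent2018/Day23/day23_part2.py | solve
-- ===== SOURCE A (Python) =====
-- import heapq
--
-- def dist_point_to_cube(px, py, pz, x, y, z, size):
--     """Manhattan distance from point to axis-aligned cube [x,x+size-1] etc."""
--     dx = 0 if x <= px <= x + size - 1 else (x - px if px < x else px - (x + size - 1))
--     dy = 0 if y <= py <= y + size - 1 else (y - py if py < y else py - (y + size - 1))
--     dz = 0 if z <= pz <= z + size - 1 else (z - pz if pz < z else pz - (z + size - 1))
--     return dx + dy + dz
--
-- def bots_in_cube(bots, x, y, z, size):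
--     """Upper-bound count: bots whose range intersects this cube."""
--     c = 0
--     for bx, by, bz, br in bots:
--         if dist_point_to_cube(bx, by, bz, x, y, z, size) <= br:
--             c += 1
--     return c
--
-- def min_dist_cube_to_origin(x, y, z, size):
--     return dist_point_to_cube(0, 0, 0, x, y, z, size)
--
-- def solve(bots):
--     # Bounding cube that covers all bot centers.
--     min_x = min(b[0] for b in bots)
--     max_x = max(b[0] for b in bots)
--     min_y = min(b[1] for b in bots)
--     max_y = max(b[1] for b in bots)
--     min_z = min(b[2] for b in bots)
--     max_z = max(b[2] for b in bots)
--
--     size = 1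
--     span = max(max_x - min_x + 1, max_y - min_y + 1, max_z - min_z + 1)
--     while size < span:
--         size *= 2
--
--     # Max-heap by bot count, then min distance to origin, then smaller cube size.
--     pq = []
--     count = bots_in_cube(bots, min_x, min_y, min_z, size)
--     heapq.heappush(pq, (-count, min_dist_cube_to_origin(min_x, min_y, min_z, size), size, min_x, min_y, min_z))
--
--     while pq:
--         neg_count, dist0, csize, x, y, z = heapq.heappop(pq)
--         count = -neg_count
--
--         if csize == 1:
--             # Single point cube: optimal by heap ordering.
--             return dist0
--
--         half = csize // 2
--         for dx in (0, half):
--             for dy in (0, half):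
--                 for dz in (0, half):
--                     nx, ny, nz = x + dx, y + dy, z + dz
--                     ncount = bots_in_cube(bots, nx, ny, nz, half)
--                     ndist = min_dist_cube_to_origin(nx, ny, nz, half)
--                     heapq.heappush(pq, (-ncount, ndist, half, nx, ny, nz))
--
--     raise RuntimeError('search failed')
-- ===== SOURCE B (Python) =====
-- def dist_point_to_cube(px, py, pz, x, y, z, size):
--     """Manhattan distance from point to axis-aligned cube [x,x+size-1] etc."""
--     dx = 0 if x <= px <= x + size - 1 else (x - px if px < x else px - (x + size - 1))
--     dy = 0 if y <= py <= y + size - 1 else (y - py if py < y else py - (y + size - 1))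
--     dz = 0 if z <= pz <= z + size - 1 else (z - pz if pz < z else pz - (z + size - 1))
--     return dx + dy + dz
--
-- def bots_in_cube(bots, x, y, z, size):
--     """Upper-bound count: bots whose range intersects this cube."""
--     c = 0
--     for bx, by, bz, br in bots:
--         if dist_point_to_cube(bx, by, bz, x, y, z, size) <= br:
--             c += 1
--     return c
--
-- def solve(bots):
--     # Bounding cube over all bot centers (single pass for the six extrema).
--     mnx = mxx = bots[0][0]
--     mny = mxy = bots[0][1]
--     mnz = mxz = bots[0][2]
--     for bx, by, bz, br in bots:
--         if bx < mnx: mnx = bx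
--         if mxx < bx: mxx = bx
--         if by < mny: mny = by
--         if mxy < by: mxy = by
--         if bz < mnz: mnz = bz
--         if mxz < bz: mxz = bz
--     span = max(max(mxx - mnx + 1, mxy - mny + 1), mxz - mnz + 1)
--     size = 1
--     while size < span:
--         size *= 2
--
--     def dfs(x, y, z, s, best):
--         # best is the incumbent (count, dist) or None; returns updated incumbent.
--         if s == 1:
--             c = bots_in_cube(bots, x, y, z, 1)
--             d = abs(x) + abs(y) + abs(z)
--             if best is None or c > best[0] or (c == best[0] and d < best[1]):
--                 return (c, d)
--             return best
--         half = s // 2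
--         kids = []
--         for dx in (0, half):
--             for dy in (0, half):
--                 for dz in (0, half):
--                     nx, ny, nz = x + dx, y + dy, z + dz
--                     kids.append((-bots_in_cube(bots, nx, ny, nz, half),
--                                  dist_point_to_cube(0, 0, 0, nx, ny, nz, half),
--                                  nx, ny, nz))
--         # explore most promising octants first (two stable sorts = order by (-count, dist))
--         kids.sort(key=lambda k: k[1])
--         kids.sort(key=lambda k: k[0])
--         for nc, nd, nx, ny, nz in kids:
--             cnt = -nc
--             if best is not None and (cnt < best[0] or (cnt == best[0] and nd >= best[1])):
--                 continue  # cannot beat the incumbent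
--             best = dfs(nx, ny, nz, half, best)
--         return best
--
--     return dfs(mnx, mny, mnz, size, None)[1]
-- ===== Notes on version B (the rewrite author's own statement) =====
-- stated objective: alternative
-- what changed: Replaced the heap-driven best-first octree search with a recursive depth-first branch-and-bound that keeps a (count, distance) incumbent, orders each cube's eight octants by (bound count desc, origin distance asc) and prunes octants that cannot beat the incumbent; also computes the six bounding-box extrema in a single pass instead of six generator scans.
-- outside the precondition, e.g. on solve([]): A raises ValueError, B raises IndexError
import Mathlib
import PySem

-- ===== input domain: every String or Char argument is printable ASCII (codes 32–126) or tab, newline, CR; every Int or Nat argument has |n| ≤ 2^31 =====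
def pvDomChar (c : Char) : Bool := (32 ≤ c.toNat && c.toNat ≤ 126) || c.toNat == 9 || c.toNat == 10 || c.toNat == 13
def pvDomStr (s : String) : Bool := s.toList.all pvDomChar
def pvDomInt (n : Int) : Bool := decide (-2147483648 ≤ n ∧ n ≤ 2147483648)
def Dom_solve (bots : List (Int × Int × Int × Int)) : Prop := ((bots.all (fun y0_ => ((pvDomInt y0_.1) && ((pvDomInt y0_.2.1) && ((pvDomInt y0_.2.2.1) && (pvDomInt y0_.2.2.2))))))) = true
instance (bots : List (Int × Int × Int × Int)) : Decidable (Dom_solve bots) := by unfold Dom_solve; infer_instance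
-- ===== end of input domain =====

-- B replaces A's heap-driven best-first octree search by a recursive DFS branch-and-bound
-- with an incumbent; same geometry helpers, same answer (objective: alternative algorithm).

-- ===== PORT A =====
-- shared module helpers (both Python versions use these exact functions)
def pvAxd (p x s : Int) : Int :=
  if x ≤ p ∧ p ≤ x + s - 1 then 0 else if p < x then x - p else p - (x + s - 1)

def dist_point_to_cube (px py pz x y z size : Int) : Int :=
  pvAxd px x size + pvAxd py y size + pvAxd pz z size

def bots_in_cube (bots : List (Int × Int × Int × Int)) (x y z size : Int) : Int :=
  bots.foldl (fun c b =>
    if dist_point_to_cube b.1 b.2.1 b.2.2.1 x y z size ≤ b.2.2.2 then c + 1 else c) 0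

def min_dist_cube_to_origin (x y z size : Int) : Int := dist_point_to_cube 0 0 0 x y z size

-- Python tuple comparison (lexicographic ≤) on the key list of a heap entry.
def pvLexLe : List Int → List Int → Bool
  | [], _ => true
  | _ :: _, [] => false
  | a :: as_, b :: bs => if a < b then true else if b < a then false else pvLexLe as_ bs

def pvKeyA (e : Int × Int × Int × Int × Int × Int) : List Int :=
  [e.1, e.2.1, e.2.2.1, e.2.2.2.1, e.2.2.2.2.1, e.2.2.2.2.2]

def entLe (a b : Int × Int × Int × Int × Int × Int) : Bool := pvLexLe (pvKeyA a) (pvKeyA b)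

-- heapq modelled as extraction of the (unique: entries contain their cube's size and
-- coordinates, so keys are distinct) lexicographically smallest tuple from the list.
def popMin : List (Int × Int × Int × Int × Int × Int) →
    Option ((Int × Int × Int × Int × Int × Int) × List (Int × Int × Int × Int × Int × Int))
  | [] => none
  | e :: rest =>
    match popMin rest with
    | none => some (e, [])
    | some (m, r) => if entLe e m then some (e, rest) else some (m, e :: r)

theorem popMin_eq_none_iff (l : List (Int × Int × Int × Int × Int × Int)) :
    popMin l = none ↔ l = [] := by
  cases l with
  | nil => simp [popMin]
  | cons e rest =>
    simp only [popMin]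
    cases popMin rest with
    | none => simp
    | some p => cases p with | mk m r => by_cases h : entLe e m = true <;> simp [h]

theorem popMin_perm : ∀ (l : List (Int × Int × Int × Int × Int × Int)) e r,
    popMin l = some (e, r) → l.Perm (e :: r) := by
  intro l
  induction l with
  | nil => intro e r h; simp [popMin] at h
  | cons a rest ih =>
    intro e r h
    simp only [popMin] at h
    cases hrest : popMin rest with
    | none =>
      rw [hrest] at h
      have : rest = [] := (popMin_eq_none_iff rest).1 hrest
      subst this
      simp at h
      obtain ⟨h1, h2⟩ := h
      subst h1; subst h2; exact List.Perm.refl _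
    | some p =>
      obtain ⟨m, r'⟩ := p
      rw [hrest] at h
      by_cases hle : entLe a m = true
      · simp [hle] at h
        obtain ⟨h1, h2⟩ := h; subst h1; subst h2; exact List.Perm.refl _
      · simp [hle] at h
        obtain ⟨h1, h2⟩ := h; subst h1; subst h2
        have hp := ih m r' hrest
        exact (hp.cons a).trans (List.Perm.swap m a r')

-- the termination measure of the heap loop: Σ size⁴ over the frontier
def pvMu (pq : List (Int × Int × Int × Int × Int × Int)) : Nat :=
  (pq.map (fun e => (e.2.2.1.toNat) ^ 4)).sum

theorem pvMu_perm {l l' : List (Int × Int × Int × Int × Int × Int)} (h : l.Perm l') :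
    pvMu l = pvMu l' := List.Perm.sum_eq (List.Perm.map _ h)

theorem pvMu_pop_lt {pq e rest} (hp : popMin pq = some (e, rest)) (h2 : 2 ≤ e.2.2.1)
    (children : List (Int × Int × Int × Int × Int × Int))
    (hc : children.map (fun c => c.2.2.1) =
      List.replicate 8 (PySem.Int.floordiv e.2.2.1 2)) :
    pvMu (rest ++ children) < pvMu pq := by
  have hperm := popMin_perm pq e rest hp
  rw [pvMu_perm hperm]
  have hmu : pvMu (e :: rest) = (e.2.2.1.toNat) ^ 4 + pvMu rest := by
    simp [pvMu]
  have happ : pvMu (rest ++ children) = pvMu rest + pvMu children := by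
    simp [pvMu]
  have hchild : pvMu children = 8 * ((PySem.Int.floordiv e.2.2.1 2).toNat) ^ 4 := by
    have : children.map (fun e => (e.2.2.1.toNat) ^ 4) =
        (children.map (fun c => c.2.2.1)).map (fun v => (v.toNat) ^ 4) := by
      rw [List.map_map]
      rfl
    rw [pvMu, this, hc]
    simp only [List.map_replicate, List.sum_replicate, smul_eq_mul]
  rw [hmu, happ, hchild]
  have hfd : PySem.Int.floordiv e.2.2.1 2 = e.2.2.1 / 2 :=
    PySem.Int.floordiv_eq_ediv_of_pos (by omega)
  set t : Nat := e.2.2.1.toNat with ht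
  have htt : (PySem.Int.floordiv e.2.2.1 2).toNat = t / 2 := by
    rw [hfd]; omega
  rw [htt]
  have ht2 : 2 ≤ t := by omega
  have hu : 1 ≤ t / 2 := by omega
  have h2u : 2 * (t / 2) ≤ t := by omega
  have hpow : (2 * (t / 2)) ^ 4 ≤ t ^ 4 := Nat.pow_le_pow_left h2u 4
  have h16 : (2 * (t / 2)) ^ 4 = 16 * (t / 2) ^ 4 := by ring
  have hpos : 0 < (t / 2) ^ 4 := pow_pos (by omega : 0 < t / 2) 4
  omega

def loopA (bots : List (Int × Int × Int × Int))
    (pq : List (Int × Int × Int × Int × Int × Int)) : Int :=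
  match hp : popMin pq with
  | none => 0  -- Python: 'raise RuntimeError' — unreachable from solve (frontier never empties)
  | some (e, rest) =>
    if h1 : e.2.2.1 = 1 then e.2.1
    else if h2 : e.2.2.1 < 2 then 0  -- totality guard; unreachable (all sizes are positive powers of two)
    else
      let x := e.2.2.2.1
      let y := e.2.2.2.2.1
      let z := e.2.2.2.2.2
      let half := PySem.Int.floordiv e.2.2.1 2
      let children := ([0, half] : List Int).flatMap (fun dx =>
        ([0, half] : List Int).flatMap (fun dy =>
          ([0, half] : List Int).map (fun dz =>
            (-(bots_in_cube bots (x + dx) (y + dy) (z + dz) half),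
             min_dist_cube_to_origin (x + dx) (y + dy) (z + dz) half,
             half, x + dx, y + dy, z + dz))))
      loopA bots (rest ++ children)
termination_by pvMu pq
decreasing_by
  exact pvMu_pop_lt hp (by omega) _ (by simp [List.flatMap])

def growA (span s : Int) : Int :=
  if _h : s < span then
    (if _hs : s < 1 then s  -- totality guard; unreachable (size starts at 1)
     else growA span (2 * s))
  else s
termination_by (span - s).toNat
decreasing_by omega

def solve (bots : List (Int × Int × Int × Int)) : Int :=
  match bots with
  | [] => 0  -- Python: min() of an empty sequence raises ValueError; excluded by Pre_solve
  | _ :: _ =>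
    let min_x := (PySem.List.min? (bots.map (fun b => b.1)) (fun v => v)).getD 0
    let max_x := (PySem.List.max? (bots.map (fun b => b.1)) (fun v => v)).getD 0
    let min_y := (PySem.List.min? (bots.map (fun b => b.2.1)) (fun v => v)).getD 0
    let max_y := (PySem.List.max? (bots.map (fun b => b.2.1)) (fun v => v)).getD 0
    let min_z := (PySem.List.min? (bots.map (fun b => b.2.2.1)) (fun v => v)).getD 0
    let max_z := (PySem.List.max? (bots.map (fun b => b.2.2.1)) (fun v => v)).getD 0
    let span := max (max (max_x - min_x + 1) (max_y - min_y + 1)) (max_z - min_z + 1)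
    let size := growA span 1
    let count := bots_in_cube bots min_x min_y min_z size
    loopA bots
      [(-count, min_dist_cube_to_origin min_x min_y min_z size, size, min_x, min_y, min_z)]

-- ===== PORT B =====
def growB (span s : Int) : Int :=
  if _h : s < span then
    (if _hs : s < 1 then s  -- totality guard; unreachable
     else growB span (2 * s))
  else s
termination_by (span - s).toNat
decreasing_by omega

mutual
def dfsB (bots : List (Int × Int × Int × Int)) (x y z s : Int)
    (best : Option (Int × Int)) : Option (Int × Int) :=
  if _h0 : s < 1 then best  -- totality guard; unreachable (sizes are positive powers of two)
  else if _h1 : s = 1 then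
    let c := bots_in_cube bots x y z 1
    let d := |x| + |y| + |z|
    match best with
    | none => some (c, d)
    | some bp => if bp.1 < c ∨ (c = bp.1 ∧ d < bp.2) then some (c, d) else some bp
  else
    let half := PySem.Int.floordiv s 2
    let kids := ([0, half] : List Int).flatMap (fun dx =>
      ([0, half] : List Int).flatMap (fun dy =>
        ([0, half] : List Int).map (fun dz =>
          (-(bots_in_cube bots (x + dx) (y + dy) (z + dz) half),
           dist_point_to_cube 0 0 0 (x + dx) (y + dy) (z + dz) half,
           x + dx, y + dy, z + dz))))
    -- two stable sorts = Python's kids.sort(key=k[1]); kids.sort(key=k[0])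
    let skids := PySem.List.sorted (PySem.List.sorted kids (fun k => k.2.1) false)
      (fun k => k.1) false
    goB bots half skids best
termination_by (s.toNat, 0)
decreasing_by
  have hfd : PySem.Int.floordiv s 2 = s / 2 := PySem.Int.floordiv_eq_ediv_of_pos (by omega)
  apply Prod.Lex.left
  omega

def goB (bots : List (Int × Int × Int × Int)) (s : Int)
    (kids : List (Int × Int × Int × Int × Int)) (best : Option (Int × Int)) :
    Option (Int × Int) :=
  match kids with
  | [] => best
  | k :: ks =>
    let cnt := -k.1
    let nd := k.2.1
    let best' :=
      match best with
      | none => dfsB bots k.2.2.1 k.2.2.2.1 k.2.2.2.2 s best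
      | some bp =>
        if cnt < bp.1 ∨ (cnt = bp.1 ∧ bp.2 ≤ nd) then some bp  -- pruned: cannot beat incumbent
        else dfsB bots k.2.2.1 k.2.2.2.1 k.2.2.2.2 s best
    goB bots s ks best'
termination_by (s.toNat, kids.length + 1)
decreasing_by
  all_goals apply Prod.Lex.right
  all_goals simp
end

def solve_alt (bots : List (Int × Int × Int × Int)) : Int :=
  match bots with
  | [] => 0  -- Python B: bots[0] raises IndexError; excluded by Pre_solve
  | b0 :: _ =>
    let m := bots.foldl
      (fun (a : Int × Int × Int × Int × Int × Int) b =>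
        (if b.1 < a.1 then b.1 else a.1,
         if a.2.1 < b.1 then b.1 else a.2.1,
         if b.2.1 < a.2.2.1 then b.2.1 else a.2.2.1,
         if a.2.2.2.1 < b.2.1 then b.2.1 else a.2.2.2.1,
         if b.2.2.1 < a.2.2.2.2.1 then b.2.2.1 else a.2.2.2.2.1,
         if a.2.2.2.2.2 < b.2.2.1 then b.2.2.1 else a.2.2.2.2.2))
      (b0.1, b0.1, b0.2.1, b0.2.1, b0.2.2.1, b0.2.2.1)
    let span := max (max (m.2.1 - m.1 + 1) (m.2.2.2.1 - m.2.2.1 + 1))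
      (m.2.2.2.2.2 - m.2.2.2.2.1 + 1)
    let size := growB span 1
    match dfsB bots m.1 m.2.2.1 m.2.2.2.2.1 size none with
    | some p => p.2
    | none => 0  -- unreachable: the search always reaches at least one point

-- ===== PRECONDITION & SPEC =====
-- Pre_ excludes only the empty list, on which both Pythons raise (A: ValueError from min(),
-- B: IndexError from bots[0]).
def Pre_solve (bots : List (Int × Int × Int × Int)) : Prop := bots ≠ []
instance (bots : List (Int × Int × Int × Int)) : Decidable (Pre_solve bots) := by
  unfold Pre_solve; infer_instance

def pvWitness_solve : (List (Int × Int × Int × Int)) := [(0, 0, 0, 0)]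

def Spec_solve (bots : List (Int × Int × Int × Int)) (out : Int) : Prop := out = solve_alt bots
instance (bots : List (Int × Int × Int × Int)) (out : Int) : Decidable (Spec_solve bots out) := by
  unfold Spec_solve; infer_instance

-- ===== CLAIM (what is proved, stated in full; the proofs are below) =====
def Claim_equal_solve : Prop := ∀ (bots : List (Int × Int × Int × Int)),
  Dom_solve bots → Pre_solve bots → Spec_solve bots (solve bots)


-- ===== LEMMAS AND PROOFS =====

-- the (count, distance) value order: a is at least as good as b
def pvPge (a b : Int × Int) : Prop := b.1 < a.1 ∨ (b.1 = a.1 ∧ a.2 ≤ b.2)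

-- keep-first maximum: replace a by b only when b is strictly better
def pvMax (a b : Int × Int) : Int × Int :=
  if a.1 < b.1 ∨ (b.1 = a.1 ∧ b.2 < a.2) then b else a

def pvBot : Int × Int := (-1, 0)

theorem pvPge_refl (a : Int × Int) : pvPge a a := by unfold pvPge; omega

theorem pvPge_trans {a b c : Int × Int} (h1 : pvPge a b) (h2 : pvPge b c) : pvPge a c := by
  unfold pvPge at *; omega

theorem pvPge_antisymm {a b : Int × Int} (h1 : pvPge a b) (h2 : pvPge b a) : a = b := by
  obtain ⟨a1, a2⟩ := a; obtain ⟨b1, b2⟩ := b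
  unfold pvPge at *
  simp only [Prod.mk.injEq]
  omega

theorem pvMax_eq_or (a b : Int × Int) : pvMax a b = a ∨ pvMax a b = b := by
  unfold pvMax; split_ifs <;> simp

theorem pvPge_max_left {a b : Int × Int} : pvPge (pvMax a b) a := by
  obtain ⟨a1, a2⟩ := a; obtain ⟨b1, b2⟩ := b
  unfold pvMax pvPge; split_ifs <;> simp_all <;> omega

theorem pvPge_max_right {a b : Int × Int} : pvPge (pvMax a b) b := by
  obtain ⟨a1, a2⟩ := a; obtain ⟨b1, b2⟩ := b
  unfold pvMax pvPge; split_ifs <;> simp_all <;> omega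

theorem pvMax_eq_left {a b : Int × Int} (h : pvPge a b) : pvMax a b = a := by
  obtain ⟨a1, a2⟩ := a; obtain ⟨b1, b2⟩ := b
  unfold pvMax pvPge at *; split_ifs <;> simp_all <;> omega

theorem pvMax_bot {q : Int × Int} (h : 0 ≤ q.1) : pvMax pvBot q = q := by
  obtain ⟨q1, q2⟩ := q
  unfold pvMax pvBot; split_ifs <;> simp_all <;> omega

theorem pvMax_assoc (a b c : Int × Int) : pvMax (pvMax a b) c = pvMax a (pvMax b c) := by
  obtain ⟨a1, a2⟩ := a; obtain ⟨b1, b2⟩ := b; obtain ⟨c1, c2⟩ := c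
  unfold pvMax; split_ifs <;> simp_all [Prod.mk.injEq] <;> omega

theorem pvMax_right_comm (b a1 a2 : Int × Int) :
    pvMax (pvMax b a1) a2 = pvMax (pvMax b a2) a1 := by
  obtain ⟨x1, x2⟩ := b; obtain ⟨y1, y2⟩ := a1; obtain ⟨z1, z2⟩ := a2
  unfold pvMax; split_ifs <;> simp_all [Prod.mk.injEq] <;> omega

theorem foldl_pvMax_init : ∀ (l : List (Int × Int)) (a c : Int × Int),
    List.foldl pvMax (pvMax a c) l = pvMax a (List.foldl pvMax c l) := by
  intro l
  induction l with
  | nil => intro a c; rfl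
  | cons d t ih =>
    intro a c
    simp only [List.foldl_cons]
    rw [pvMax_assoc, ih]

theorem foldl_pvMax_ge_init : ∀ (l : List (Int × Int)) (a : Int × Int),
    pvPge (List.foldl pvMax a l) a := by
  intro l
  induction l with
  | nil => intro a; exact pvPge_refl a
  | cons b t ih =>
    intro a
    simp only [List.foldl_cons]
    exact pvPge_trans (ih (pvMax a b)) pvPge_max_left

theorem foldl_pvMax_ge : ∀ (l : List (Int × Int)) (a q : Int × Int), q ∈ l →
    pvPge (List.foldl pvMax a l) q := by
  intro l
  induction l with
  | nil => intro a q h; simp at h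
  | cons b t ih =>
    intro a q h
    simp only [List.foldl_cons]
    rcases List.mem_cons.1 h with h | h
    · subst h
      exact pvPge_trans (foldl_pvMax_ge_init t (pvMax a q)) pvPge_max_right
    · exact ih _ q h

theorem foldl_pvMax_mem : ∀ (l : List (Int × Int)) (a : Int × Int),
    List.foldl pvMax a l = a ∨ List.foldl pvMax a l ∈ l := by
  intro l
  induction l with
  | nil => intro a; left; rfl
  | cons b t ih =>
    intro a
    simp only [List.foldl_cons]
    rcases ih (pvMax a b) with h | h
    · rcases pvMax_eq_or a b with h2 | h2
      · left; rw [h, h2]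
      · right; rw [h, h2]; exact List.mem_cons_self
    · right; exact List.mem_cons_of_mem _ h

theorem foldl_pvMax_perm {l l' : List (Int × Int)} (h : l.Perm l') (a : Int × Int) :
    List.foldl pvMax a l = List.foldl pvMax a l' :=
  List.Perm.foldl_eq (rcomm := ⟨pvMax_right_comm⟩) h a


-- ===== geometry =====

def pvIn (px py pz x y z s : Int) : Prop :=
  x ≤ px ∧ px ≤ x + s - 1 ∧ y ≤ py ∧ py ≤ y + s - 1 ∧ z ≤ pz ∧ pz ≤ z + s - 1

theorem pvAxd_mono {p x s : Int} (h1 : x ≤ p) (h2 : p ≤ x + s - 1) (q : Int) :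
    pvAxd q x s ≤ pvAxd q p 1 := by
  unfold pvAxd; split_ifs <;> omega

theorem pvAxd_zero_one (x : Int) : pvAxd 0 x 1 = |x| := by
  unfold pvAxd
  rcases abs_cases x with ⟨h, _⟩ | ⟨h, _⟩ <;> split_ifs <;> omega

theorem dist_le_point {px py pz x y z s : Int} (hin : pvIn px py pz x y z s)
    (bx bY bz : Int) :
    dist_point_to_cube bx bY bz x y z s ≤ dist_point_to_cube bx bY bz px py pz 1 := by
  obtain ⟨h1, h2, h3, h4, h5, h6⟩ := hin
  unfold dist_point_to_cube
  have := pvAxd_mono h1 h2 bx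
  have := pvAxd_mono h3 h4 bY
  have := pvAxd_mono h5 h6 bz
  omega

theorem minDist_one (x y z : Int) : min_dist_cube_to_origin x y z 1 = |x| + |y| + |z| := by
  unfold min_dist_cube_to_origin dist_point_to_cube
  rw [pvAxd_zero_one, pvAxd_zero_one, pvAxd_zero_one]

theorem botsInCube_eq (bots : List (Int × Int × Int × Int)) (x y z s : Int) :
    bots_in_cube bots x y z s =
      ((bots.countP (fun b =>
        decide (dist_point_to_cube b.1 b.2.1 b.2.2.1 x y z s ≤ b.2.2.2))) : Int) := by
  unfold bots_in_cube
  rw [PySem.List.foldl_ite_add_one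
    (fun b : Int × Int × Int × Int => dist_point_to_cube b.1 b.2.1 b.2.2.1 x y z s ≤ b.2.2.2)]
  ring

theorem botsInCube_nonneg (bots : List (Int × Int × Int × Int)) (x y z s : Int) :
    0 ≤ bots_in_cube bots x y z s := by
  rw [botsInCube_eq]; positivity

theorem cnt_point_le {px py pz x y z s : Int} (bots : List (Int × Int × Int × Int))
    (hin : pvIn px py pz x y z s) :
    bots_in_cube bots px py pz 1 ≤ bots_in_cube bots x y z s := by
  rw [botsInCube_eq, botsInCube_eq]
  have := List.countP_mono_left (l := bots)
    (p := fun b : Int × Int × Int × Int =>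
      decide (dist_point_to_cube b.1 b.2.1 b.2.2.1 px py pz 1 ≤ b.2.2.2))
    (q := fun b : Int × Int × Int × Int =>
      decide (dist_point_to_cube b.1 b.2.1 b.2.2.1 x y z s ≤ b.2.2.2))
    (by
      intro b _ hb
      simp only [decide_eq_true_eq] at *
      exact le_trans (dist_le_point hin b.1 b.2.1 b.2.2.1) hb)
  exact_mod_cast this

theorem dist0_le_point {px py pz x y z s : Int} (hin : pvIn px py pz x y z s) :
    min_dist_cube_to_origin x y z s ≤ |px| + |py| + |pz| := by
  have h := dist_le_point hin 0 0 0
  have h2 : dist_point_to_cube 0 0 0 px py pz 1 = |px| + |py| + |pz| := minDist_one px py pz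
  unfold min_dist_cube_to_origin
  omega

-- ===== the exact optimum of a cube of size 2^n (the common spec of both searches) =====

def pvBest (bots : List (Int × Int × Int × Int)) (x y z : Int) : Nat → Int × Int
  | 0 => (bots_in_cube bots x y z 1, |x| + |y| + |z|)
  | m + 1 =>
    pvMax (pvMax (pvMax (pvMax (pvMax (pvMax (pvMax
      (pvBest bots x y z m)
      (pvBest bots x y (z + 2 ^ m) m))
      (pvBest bots x (y + 2 ^ m) z m))
      (pvBest bots x (y + 2 ^ m) (z + 2 ^ m) m))
      (pvBest bots (x + 2 ^ m) y z m))
      (pvBest bots (x + 2 ^ m) y (z + 2 ^ m) m))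
      (pvBest bots (x + 2 ^ m) (y + 2 ^ m) z m))
      (pvBest bots (x + 2 ^ m) (y + 2 ^ m) (z + 2 ^ m) m)

theorem pvIn_widen {px py pz x y z dx dy dz h : Int} (hp : 0 < h)
    (hdx : dx = 0 ∨ dx = h) (hdy : dy = 0 ∨ dy = h) (hdz : dz = 0 ∨ dz = h)
    (hin : pvIn px py pz (x + dx) (y + dy) (z + dz) h) : pvIn px py pz x y z (2 * h) := by
  unfold pvIn at *
  rcases hdx with rfl | rfl <;> rcases hdy with rfl | rfl <;> rcases hdz with rfl | rfl <;> omega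

theorem pvBest_att (bots : List (Int × Int × Int × Int)) :
    ∀ (n : Nat) (x y z : Int), ∃ px py pz : Int,
      pvIn px py pz x y z (2 ^ n) ∧
      pvBest bots x y z n = (bots_in_cube bots px py pz 1, |px| + |py| + |pz|) := by
  intro n
  induction n with
  | zero =>
    intro x y z
    exact ⟨x, y, z, by unfold pvIn; norm_num, rfl⟩
  | succ m ih =>
    intro x y z
    have hp : (0 : Int) < 2 ^ m := by positivity
    have hss : (2 : Int) ^ (m + 1) = 2 * 2 ^ m := by rw [pow_succ]; ring
    set h : Int := 2 ^ m with hh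
    set c0 := pvBest bots x y z m with hc0
    set c1 := pvBest bots x y (z + h) m with hc1
    set c2 := pvBest bots x (y + h) z m with hc2
    set c3 := pvBest bots x (y + h) (z + h) m with hc3
    set c4 := pvBest bots (x + h) y z m with hc4
    set c5 := pvBest bots (x + h) y (z + h) m with hc5
    set c6 := pvBest bots (x + h) (y + h) z m with hc6
    set c7 := pvBest bots (x + h) (y + h) (z + h) m with hc7
    have hB : pvBest bots x y z (m + 1) =
        pvMax (pvMax (pvMax (pvMax (pvMax (pvMax (pvMax c0 c1) c2) c3) c4) c5) c6) c7 := rfl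
    have pick : ∀ (dx dy dz : Int), (dx = 0 ∨ dx = h) → (dy = 0 ∨ dy = h) → (dz = 0 ∨ dz = h) →
        pvBest bots x y z (m + 1) = pvBest bots (x + dx) (y + dy) (z + dz) m →
        ∃ px py pz : Int, pvIn px py pz x y z (2 ^ (m + 1)) ∧
          pvBest bots x y z (m + 1) = (bots_in_cube bots px py pz 1, |px| + |py| + |pz|) := by
      intro dx dy dz hdx hdy hdz heq
      obtain ⟨px, py, pz, hin, hval⟩ := ih (x + dx) (y + dy) (z + dz)
      refine ⟨px, py, pz, ?_, by rw [heq, hval]⟩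
      rw [hss]
      exact pvIn_widen hp hdx hdy hdz hin
    rcases pvMax_eq_or (pvMax (pvMax (pvMax (pvMax (pvMax (pvMax c0 c1) c2) c3) c4) c5) c6) c7
      with h7 | h7
    · rcases pvMax_eq_or (pvMax (pvMax (pvMax (pvMax (pvMax c0 c1) c2) c3) c4) c5) c6
        with h6 | h6
      · rcases pvMax_eq_or (pvMax (pvMax (pvMax (pvMax c0 c1) c2) c3) c4) c5 with h5 | h5
        · rcases pvMax_eq_or (pvMax (pvMax (pvMax c0 c1) c2) c3) c4 with h4 | h4
          · rcases pvMax_eq_or (pvMax (pvMax c0 c1) c2) c3 with h3 | h3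
            · rcases pvMax_eq_or (pvMax c0 c1) c2 with h2 | h2
              · rcases pvMax_eq_or c0 c1 with h1 | h1
                · exact pick 0 0 0 (Or.inl rfl) (Or.inl rfl) (Or.inl rfl)
                    (by rw [hB, h7, h6, h5, h4, h3, h2, h1, hc0]; norm_num)
                · exact pick 0 0 h (Or.inl rfl) (Or.inl rfl) (Or.inr rfl)
                    (by rw [hB, h7, h6, h5, h4, h3, h2, h1, hc1]; norm_num)
              · exact pick 0 h 0 (Or.inl rfl) (Or.inr rfl) (Or.inl rfl)
                  (by rw [hB, h7, h6, h5, h4, h3, h2, hc2]; norm_num)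
            · exact pick 0 h h (Or.inl rfl) (Or.inr rfl) (Or.inr rfl)
                (by rw [hB, h7, h6, h5, h4, h3, hc3]; norm_num)
          · exact pick h 0 0 (Or.inr rfl) (Or.inl rfl) (Or.inl rfl)
              (by rw [hB, h7, h6, h5, h4, hc4]; norm_num)
        · exact pick h 0 h (Or.inr rfl) (Or.inl rfl) (Or.inr rfl)
            (by rw [hB, h7, h6, h5, hc5]; norm_num)
      · exact pick h h 0 (Or.inr rfl) (Or.inr rfl) (Or.inl rfl)
          (by rw [hB, h7, h6, hc6]; norm_num)
    · exact pick h h h (Or.inr rfl) (Or.inr rfl) (Or.inr rfl)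
        (by rw [hB, h7, hc7])

theorem pvBest_count_nonneg (bots : List (Int × Int × Int × Int)) (n : Nat) (x y z : Int) :
    0 ≤ (pvBest bots x y z n).1 := by
  obtain ⟨px, py, pz, _, hval⟩ := pvBest_att bots n x y z
  rw [hval]
  exact botsInCube_nonneg bots px py pz 1

theorem pvBest_count_le (bots : List (Int × Int × Int × Int)) (n : Nat) (x y z : Int) :
    (pvBest bots x y z n).1 ≤ bots_in_cube bots x y z (2 ^ n) := by
  obtain ⟨px, py, pz, hin, hval⟩ := pvBest_att bots n x y z
  rw [hval]
  exact cnt_point_le bots hin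

theorem pvBest_dist_ge (bots : List (Int × Int × Int × Int)) (n : Nat) (x y z : Int) :
    min_dist_cube_to_origin x y z (2 ^ n) ≤ (pvBest bots x y z n).2 := by
  obtain ⟨px, py, pz, hin, hval⟩ := pvBest_att bots n x y z
  rw [hval]
  exact dist0_le_point hin


-- ===== B side: the DFS branch-and-bound computes the cube optimum =====

def pvOacc : Option (Int × Int) → (Int × Int) → Int × Int
  | none, q => q
  | some bp, q => pvMax bp q

def pvKB (bots : List (Int × Int × Int × Int)) (n : Nat) (k : Int × Int × Int × Int × Int) :
    Int × Int :=
  pvBest bots k.2.2.1 k.2.2.2.1 k.2.2.2.2 n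

def pvKidWF (bots : List (Int × Int × Int × Int)) (n : Nat)
    (k : Int × Int × Int × Int × Int) : Prop :=
  k.1 = -(bots_in_cube bots k.2.2.1 k.2.2.2.1 k.2.2.2.2 (2 ^ n)) ∧
  k.2.1 = min_dist_cube_to_origin k.2.2.1 k.2.2.2.1 k.2.2.2.2 (2 ^ n)

theorem goB_eq (bots : List (Int × Int × Int × Int)) (n : Nat)
    (hdfs : ∀ x y z b, dfsB bots x y z (2 ^ n) b = some (pvOacc b (pvBest bots x y z n))) :
    ∀ (ks : List (Int × Int × Int × Int × Int)) (b : Int × Int),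
      (∀ k ∈ ks, pvKidWF bots n k) →
      goB bots (2 ^ n) ks (some b) =
        some (ks.foldl (fun acc k => pvMax acc (pvKB bots n k)) b) := by
  intro ks
  induction ks with
  | nil => intro b _; rw [goB]; simp
  | cons k ks ih =>
    intro b hwf
    obtain ⟨hwc, hwd⟩ := hwf k List.mem_cons_self
    have hwfs : ∀ k' ∈ ks, pvKidWF bots n k' := fun k' hk' => hwf k' (List.mem_cons_of_mem _ hk')
    rw [goB]
    simp only [List.foldl_cons]
    by_cases hpr : (-k.1 < b.1 ∨ (-k.1 = b.1 ∧ b.2 ≤ k.2.1))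
    · rw [if_pos hpr]
      have hb : pvMax b (pvKB bots n k) = b := by
        apply pvMax_eq_left
        have hc1 : (pvKB bots n k).1 ≤ -k.1 := by
          have := pvBest_count_le bots n k.2.2.1 k.2.2.2.1 k.2.2.2.2
          unfold pvKB
          omega
        have hd1 : k.2.1 ≤ (pvKB bots n k).2 := by
          have := pvBest_dist_ge bots n k.2.2.1 k.2.2.2.1 k.2.2.2.2
          unfold pvKB
          omega
        unfold pvPge
        omega
      rw [hb]
      exact ih b hwfs
    · rw [if_neg hpr, hdfs]
      exact ih (pvMax b (pvKB bots n k)) hwfs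

theorem goB_cons_none (bots : List (Int × Int × Int × Int)) (n : Nat)
    (hdfs : ∀ x y z b, dfsB bots x y z (2 ^ n) b = some (pvOacc b (pvBest bots x y z n)))
    (k : Int × Int × Int × Int × Int) (ks : List (Int × Int × Int × Int × Int)) :
    goB bots (2 ^ n) (k :: ks) none = goB bots (2 ^ n) ks (some (pvKB bots n k)) := by
  rw [goB]
  simp only [hdfs]
  rfl

theorem dfsB_eq (bots : List (Int × Int × Int × Int)) :
    ∀ (n : Nat) (x y z : Int) (b : Option (Int × Int)),
      dfsB bots x y z (2 ^ n) b = some (pvOacc b (pvBest bots x y z n)) := by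
  intro n
  induction n with
  | zero =>
    intro x y z b
    rw [pow_zero, dfsB]
    norm_num
    cases b with
    | none => rfl
    | some bp =>
      show (if bp.1 < bots_in_cube bots x y z 1 ∨
            (bots_in_cube bots x y z 1 = bp.1 ∧ |x| + |y| + |z| < bp.2) then
          some (bots_in_cube bots x y z 1, |x| + |y| + |z|) else some bp) =
        some (pvMax bp (bots_in_cube bots x y z 1, |x| + |y| + |z|))
      unfold pvMax
      split_ifs <;> first | rfl | simp_all
  | succ m ih =>
    intro x y z b
    have h2 : (2 : Int) ≤ 2 ^ (m + 1) := by
      calc (2 : Int) = 2 ^ 1 := (pow_one 2).symm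
        _ ≤ 2 ^ (m + 1) := by
          apply pow_le_pow_right₀ (by norm_num)
          omega
    have hg1 : ¬ ((2 : Int) ^ (m + 1) < 1) := by omega
    have hg2 : ¬ ((2 : Int) ^ (m + 1) = 1) := by omega
    have hhalf : PySem.Int.floordiv ((2 : Int) ^ (m + 1)) 2 = 2 ^ m := by
      rw [PySem.Int.floordiv_eq_ediv_of_pos (by norm_num), pow_succ]
      exact Int.mul_ediv_cancel _ (by norm_num)
    rw [dfsB, dif_neg hg1, dif_neg hg2]
    simp only [hhalf]
    have hkids : (([0, (2:Int) ^ m] : List Int).flatMap (fun dx =>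
        ([0, (2:Int) ^ m] : List Int).flatMap (fun dy =>
          ([0, (2:Int) ^ m] : List Int).map (fun dz =>
            (-(bots_in_cube bots (x + dx) (y + dy) (z + dz) (2 ^ m)),
             dist_point_to_cube 0 0 0 (x + dx) (y + dy) (z + dz) (2 ^ m),
             x + dx, y + dy, z + dz))))) =
        ([(-(bots_in_cube bots x y z (2 ^ m)),
           dist_point_to_cube 0 0 0 x y z (2 ^ m), x, y, z),
          (-(bots_in_cube bots x y (z + 2 ^ m) (2 ^ m)),
           dist_point_to_cube 0 0 0 x y (z + 2 ^ m) (2 ^ m), x, y, z + 2 ^ m),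
          (-(bots_in_cube bots x (y + 2 ^ m) z (2 ^ m)),
           dist_point_to_cube 0 0 0 x (y + 2 ^ m) z (2 ^ m), x, y + 2 ^ m, z),
          (-(bots_in_cube bots x (y + 2 ^ m) (z + 2 ^ m) (2 ^ m)),
           dist_point_to_cube 0 0 0 x (y + 2 ^ m) (z + 2 ^ m) (2 ^ m), x, y + 2 ^ m, z + 2 ^ m),
          (-(bots_in_cube bots (x + 2 ^ m) y z (2 ^ m)),
           dist_point_to_cube 0 0 0 (x + 2 ^ m) y z (2 ^ m), x + 2 ^ m, y, z),
          (-(bots_in_cube bots (x + 2 ^ m) y (z + 2 ^ m) (2 ^ m)),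
           dist_point_to_cube 0 0 0 (x + 2 ^ m) y (z + 2 ^ m) (2 ^ m), x + 2 ^ m, y, z + 2 ^ m),
          (-(bots_in_cube bots (x + 2 ^ m) (y + 2 ^ m) z (2 ^ m)),
           dist_point_to_cube 0 0 0 (x + 2 ^ m) (y + 2 ^ m) z (2 ^ m), x + 2 ^ m, y + 2 ^ m, z),
          (-(bots_in_cube bots (x + 2 ^ m) (y + 2 ^ m) (z + 2 ^ m) (2 ^ m)),
           dist_point_to_cube 0 0 0 (x + 2 ^ m) (y + 2 ^ m) (z + 2 ^ m) (2 ^ m),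
           x + 2 ^ m, y + 2 ^ m, z + 2 ^ m)] :
          List (Int × Int × Int × Int × Int)) := by
      simp [List.flatMap]
    set KIDS := ([(-(bots_in_cube bots x y z (2 ^ m)),
           dist_point_to_cube 0 0 0 x y z (2 ^ m), x, y, z),
          (-(bots_in_cube bots x y (z + 2 ^ m) (2 ^ m)),
           dist_point_to_cube 0 0 0 x y (z + 2 ^ m) (2 ^ m), x, y, z + 2 ^ m),
          (-(bots_in_cube bots x (y + 2 ^ m) z (2 ^ m)),
           dist_point_to_cube 0 0 0 x (y + 2 ^ m) z (2 ^ m), x, y + 2 ^ m, z),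
          (-(bots_in_cube bots x (y + 2 ^ m) (z + 2 ^ m) (2 ^ m)),
           dist_point_to_cube 0 0 0 x (y + 2 ^ m) (z + 2 ^ m) (2 ^ m), x, y + 2 ^ m, z + 2 ^ m),
          (-(bots_in_cube bots (x + 2 ^ m) y z (2 ^ m)),
           dist_point_to_cube 0 0 0 (x + 2 ^ m) y z (2 ^ m), x + 2 ^ m, y, z),
          (-(bots_in_cube bots (x + 2 ^ m) y (z + 2 ^ m) (2 ^ m)),
           dist_point_to_cube 0 0 0 (x + 2 ^ m) y (z + 2 ^ m) (2 ^ m), x + 2 ^ m, y, z + 2 ^ m),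
          (-(bots_in_cube bots (x + 2 ^ m) (y + 2 ^ m) z (2 ^ m)),
           dist_point_to_cube 0 0 0 (x + 2 ^ m) (y + 2 ^ m) z (2 ^ m), x + 2 ^ m, y + 2 ^ m, z),
          (-(bots_in_cube bots (x + 2 ^ m) (y + 2 ^ m) (z + 2 ^ m) (2 ^ m)),
           dist_point_to_cube 0 0 0 (x + 2 ^ m) (y + 2 ^ m) (z + 2 ^ m) (2 ^ m),
           x + 2 ^ m, y + 2 ^ m, z + 2 ^ m)] :
          List (Int × Int × Int × Int × Int)) with hK
    rw [hkids]
    set skids := PySem.List.sorted (PySem.List.sorted KIDS (fun k => k.2.1) false)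
      (fun k => k.1) false with hsk
    have hperm : skids.Perm KIDS :=
      (PySem.List.sorted_perm _ _ _).trans (PySem.List.sorted_perm _ _ _)
    have hwfk : ∀ k ∈ KIDS, pvKidWF bots m k := by
      intro k hk
      rw [hK] at hk
      simp only [List.mem_cons, List.not_mem_nil, or_false] at hk
      rcases hk with rfl | rfl | rfl | rfl | rfl | rfl | rfl | rfl <;> exact ⟨rfl, rfl⟩
    have hwfs : ∀ k ∈ skids, pvKidWF bots m k := fun k hk => hwfk k (hperm.subset hk)
    have hc0 : pvBest bots x y z (m + 1) =
        List.foldl pvMax (pvBest bots x y z m) (KIDS.tail.map (pvKB bots m)) := by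
      rw [hK]
      rfl
    have hmapK : KIDS.map (pvKB bots m) =
        pvBest bots x y z m :: KIDS.tail.map (pvKB bots m) := by
      rw [hK]
      rfl
    cases b with
    | some bp =>
      rw [goB_eq bots m ih skids bp hwfs]
      congr 1
      calc skids.foldl (fun acc k => pvMax acc (pvKB bots m k)) bp
          = List.foldl pvMax bp (skids.map (pvKB bots m)) := List.foldl_map.symm
        _ = List.foldl pvMax bp (KIDS.map (pvKB bots m)) :=
            foldl_pvMax_perm (hperm.map _) bp
        _ = List.foldl pvMax (pvMax bp (pvBest bots x y z m))
              (KIDS.tail.map (pvKB bots m)) := by rw [hmapK, List.foldl_cons]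
        _ = pvMax bp (List.foldl pvMax (pvBest bots x y z m)
              (KIDS.tail.map (pvKB bots m))) := foldl_pvMax_init _ _ _
        _ = pvOacc (some bp) (pvBest bots x y z (m + 1)) := by rw [← hc0]; rfl
    | none =>
      have hlen : skids.length = 8 := by
        rw [hperm.length_eq, hK]
        rfl
      cases hskc : skids with
      | nil => rw [hskc] at hlen; simp at hlen
      | cons k ks =>
        rw [goB_cons_none bots m ih k ks,
          goB_eq bots m ih ks (pvKB bots m k) (by
            intro k' hk'
            apply hwfs
            rw [hskc]
            exact List.mem_cons_of_mem _ hk')]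
        congr 1
        have hnn : 0 ≤ (pvKB bots m k).1 := pvBest_count_nonneg bots m _ _ _
        calc ks.foldl (fun acc k => pvMax acc (pvKB bots m k)) (pvKB bots m k)
            = List.foldl pvMax (pvKB bots m k) (ks.map (pvKB bots m)) := List.foldl_map.symm
          _ = List.foldl pvMax (pvMax pvBot (pvKB bots m k)) (ks.map (pvKB bots m)) := by
              rw [pvMax_bot hnn]
          _ = List.foldl pvMax pvBot ((k :: ks).map (pvKB bots m)) := by
              rw [List.map_cons, List.foldl_cons]
          _ = List.foldl pvMax pvBot (skids.map (pvKB bots m)) := by rw [hskc]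
          _ = List.foldl pvMax pvBot (KIDS.map (pvKB bots m)) :=
              foldl_pvMax_perm (hperm.map _) pvBot
          _ = List.foldl pvMax (pvMax pvBot (pvBest bots x y z m))
                (KIDS.tail.map (pvKB bots m)) := by rw [hmapK, List.foldl_cons]
          _ = List.foldl pvMax (pvBest bots x y z m) (KIDS.tail.map (pvKB bots m)) := by
              rw [pvMax_bot (pvBest_count_nonneg bots m x y z)]
          _ = pvOacc none (pvBest bots x y z (m + 1)) := by rw [← hc0]; rfl


-- ===== A side: the heap best-first loop computes the same optimum =====

theorem pvLexLe_refl : ∀ l : List Int, pvLexLe l l = true := by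
  intro l
  induction l with
  | nil => rfl
  | cons a t ih => simp [pvLexLe, ih]

theorem pvLexLe_total : ∀ l1 l2 : List Int, pvLexLe l1 l2 = true ∨ pvLexLe l2 l1 = true := by
  intro l1
  induction l1 with
  | nil => intro l2; left; rfl
  | cons a t ih =>
    intro l2
    cases l2 with
    | nil => right; rfl
    | cons b u =>
      simp only [pvLexLe]
      rcases lt_trichotomy a b with h | h | h
      · left; simp [h]
      · subst h
        simp only [lt_irrefl, if_false]
        exact ih u
      · right; simp [h]

theorem pvLexLe_trans : ∀ l1 l2 l3 : List Int, pvLexLe l1 l2 = true → pvLexLe l2 l3 = true →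
    pvLexLe l1 l3 = true := by
  intro l1
  induction l1 with
  | nil => intro l2 l3 _ _; rfl
  | cons a t ih =>
    intro l2 l3 h12 h23
    cases l2 with
    | nil => simp [pvLexLe] at h12
    | cons b u =>
      cases l3 with
      | nil => simp [pvLexLe] at h23
      | cons c v =>
        simp only [pvLexLe] at *
        split_ifs at * <;> first | rfl | omega | (exact ih u v h12 h23) | simp_all

theorem entLe_refl (a : Int × Int × Int × Int × Int × Int) : entLe a a = true :=
  pvLexLe_refl _

theorem entLe_total (a b : Int × Int × Int × Int × Int × Int) :
    entLe a b = true ∨ entLe b a = true := pvLexLe_total _ _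

theorem entLe_trans {a b c : Int × Int × Int × Int × Int × Int}
    (h1 : entLe a b = true) (h2 : entLe b c = true) : entLe a c = true :=
  pvLexLe_trans _ _ _ h1 h2

theorem entLe_fields {a b : Int × Int × Int × Int × Int × Int} (h : entLe a b = true) :
    a.1 < b.1 ∨ (a.1 = b.1 ∧ a.2.1 ≤ b.2.1) := by
  obtain ⟨a1, a2, a3, a4, a5, a6⟩ := a
  obtain ⟨b1, b2, b3, b4, b5, b6⟩ := b
  unfold entLe pvKeyA at h
  dsimp only at h ⊢
  rw [pvLexLe] at h
  split_ifs at h with h1 h2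
  · omega
  · rw [pvLexLe] at h
    split_ifs at h with h3 h4
    · omega
    · omega

theorem popMin_le : ∀ (l : List (Int × Int × Int × Int × Int × Int)) e r,
    popMin l = some (e, r) → ∀ c ∈ l, entLe e c = true := by
  intro l
  induction l with
  | nil => intro e r h; simp [popMin] at h
  | cons a rest ih =>
    intro e r h c hc
    simp only [popMin] at h
    cases hrest : popMin rest with
    | none =>
      rw [hrest] at h
      have hnil : rest = [] := (popMin_eq_none_iff rest).1 hrest
      simp at h
      obtain ⟨h1, _⟩ := h
      subst h1
      subst hnil
      rcases List.mem_cons.1 hc with rfl | hc2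
      · exact entLe_refl _
      · simp at hc2
    | some p =>
      obtain ⟨mm, r2⟩ := p
      rw [hrest] at h
      by_cases hle : entLe a mm = true
      · simp only [if_pos hle, Option.some.injEq, Prod.mk.injEq] at h
        obtain ⟨h1, _⟩ := h
        subst h1
        rcases List.mem_cons.1 hc with rfl | hc2
        · exact entLe_refl _
        · exact entLe_trans hle (ih mm r2 hrest c hc2)
      · simp only [if_neg hle, Option.some.injEq, Prod.mk.injEq] at h
        obtain ⟨h1, _⟩ := h
        subst h1
        rcases List.mem_cons.1 hc with rfl | hc2
        · rcases entLe_total mm c with h' | h'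
          · exact h'
          · exact absurd h' hle
        · exact ih mm r2 hrest c hc2

theorem pvLogPow (n : Nat) : ((2 : Int) ^ n).toNat.log2 = n := by
  have h1 : ((2 : Int) ^ n).toNat = 2 ^ n := by
    rw [show ((2 : Int) ^ n) = ((2 ^ n : Nat) : Int) by push_cast; ring, Int.toNat_natCast]
  rw [h1, Nat.log2_eq_log_two, Nat.log_pow (by norm_num)]

def pvEB (bots : List (Int × Int × Int × Int)) (e : Int × Int × Int × Int × Int × Int) :
    Int × Int :=
  pvBest bots e.2.2.2.1 e.2.2.2.2.1 e.2.2.2.2.2 (e.2.2.1.toNat.log2)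

def pvWFe (bots : List (Int × Int × Int × Int))
    (e : Int × Int × Int × Int × Int × Int) : Prop :=
  ∃ n : Nat, e.2.2.1 = 2 ^ n ∧
    e.1 = -(bots_in_cube bots e.2.2.2.1 e.2.2.2.2.1 e.2.2.2.2.2 (2 ^ n)) ∧
    e.2.1 = min_dist_cube_to_origin e.2.2.2.1 e.2.2.2.2.1 e.2.2.2.2.2 (2 ^ n)

theorem pvEB_of_wf {bots e n} (hsz : e.2.2.1 = (2 : Int) ^ n) :
    pvEB bots e = pvBest bots e.2.2.2.1 e.2.2.2.2.1 e.2.2.2.2.2 n := by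
  unfold pvEB
  rw [hsz, pvLogPow]

theorem loopA_eq (bots : List (Int × Int × Int × Int)) :
    ∀ (N : Nat) (pq : List (Int × Int × Int × Int × Int × Int)), pvMu pq ≤ N → pq ≠ [] →
      (∀ e ∈ pq, pvWFe bots e) →
      loopA bots pq = (List.foldl pvMax pvBot (pq.map (pvEB bots))).2 := by
  intro N
  induction N with
  | zero =>
    intro pq hmu hne hwf
    exfalso
    cases hpq : pq with
    | nil => exact hne hpq
    | cons e rest =>
      subst hpq
      obtain ⟨n, hsz, _, _⟩ := hwf e List.mem_cons_self
      have hterm : (e.2.2.1.toNat) ^ 4 ∈ (e :: rest).map (fun e => (e.2.2.1.toNat) ^ 4) :=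
        List.mem_map_of_mem List.mem_cons_self
      have hle : (e.2.2.1.toNat) ^ 4 ≤ pvMu (e :: rest) :=
        List.single_le_sum (fun x _ => Nat.zero_le x) _ hterm
      have hp2 : (0 : Int) < 2 ^ n := by positivity
      have hpos : 0 < (e.2.2.1.toNat) ^ 4 := by
        apply pow_pos
        omega
      omega
  | succ N ih =>
    intro pq hmu hne hwf
    cases hp : popMin pq with
    | none => exact absurd ((popMin_eq_none_iff pq).1 hp) hne
    | some p =>
      obtain ⟨e, rest⟩ := p
      have hperm := popMin_perm pq e rest hp
      have hein : e ∈ pq := (hperm.mem_iff).2 List.mem_cons_self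
      obtain ⟨n, hsz, hcnt, hdst⟩ := hwf e hein
      rw [loopA.eq_def]
      split
      next heq => rw [heq] at hp; exact absurd hp (by simp)
      next e' rest' heq =>
        rw [hp] at heq
        simp only [Option.some.injEq, Prod.mk.injEq] at heq
        obtain ⟨h1, h2⟩ := heq
        subst h1
        subst h2
        cases n with
        | zero =>
          have he1 : e.2.2.1 = 1 := by rw [hsz]; norm_num
          rw [dif_pos he1]
          have hVval : pvEB bots e =
              (bots_in_cube bots e.2.2.2.1 e.2.2.2.2.1 e.2.2.2.2.2 1,
               |e.2.2.2.1| + |e.2.2.2.2.1| + |e.2.2.2.2.2|) := by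
            rw [pvEB_of_wf hsz]
            rfl
          have hV1 : (pvEB bots e).1 = -e.1 := by
            rw [hVval]
            have hc := hcnt
            rw [pow_zero] at hc
            dsimp only
            omega
          have hV2 : (pvEB bots e).2 = e.2.1 := by
            rw [hVval]
            have hd := hdst
            rw [pow_zero, minDist_one] at hd
            dsimp only
            omega
          have hge : ∀ q ∈ pq.map (pvEB bots), pvPge (pvEB bots e) q := by
            intro q hq
            obtain ⟨c, hc, rfl⟩ := List.mem_map.1 hq
            obtain ⟨mN, hsz', hcnt', hdst'⟩ := hwf c hc
            have hkey := entLe_fields (popMin_le pq e rest hp c hc)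
            have hEBc := pvEB_of_wf (bots := bots) hsz'
            have hb1 : (pvEB bots c).1 ≤ -c.1 := by
              rw [hEBc]
              have := pvBest_count_le bots mN c.2.2.2.1 c.2.2.2.2.1 c.2.2.2.2.2
              omega
            have hb2 : c.2.1 ≤ (pvEB bots c).2 := by
              rw [hEBc]
              have := pvBest_dist_ge bots mN c.2.2.2.1 c.2.2.2.2.1 c.2.2.2.2.2
              omega
            unfold pvPge
            omega
          have hgeV : pvPge (List.foldl pvMax pvBot (pq.map (pvEB bots))) (pvEB bots e) :=
            foldl_pvMax_ge _ _ _ (List.mem_map_of_mem hein)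
          have hVnn : 0 ≤ (pvEB bots e).1 := by
            rw [hVval]
            exact botsInCube_nonneg bots _ _ _ _
          rcases foldl_pvMax_mem (pq.map (pvEB bots)) pvBot with hF | hF
          · exfalso
            rw [hF] at hgeV
            unfold pvPge pvBot at hgeV
            dsimp only at hgeV
            omega
          · have hFe := hge _ hF
            have heq2 := pvPge_antisymm hgeV hFe
            rw [heq2, hV2]
        | succ m =>
          have h2le : (2 : Int) ≤ 2 ^ (m + 1) := by
            calc (2 : Int) = 2 ^ 1 := (pow_one 2).symm
              _ ≤ 2 ^ (m + 1) := by
                apply pow_le_pow_right₀ (by norm_num)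
                omega
          have hne1 : ¬ (e.2.2.1 = 1) := by rw [hsz]; omega
          have hge2 : ¬ (e.2.2.1 < 2) := by rw [hsz]; omega
          rw [dif_neg hne1, dif_neg hge2]
          have hhalf : PySem.Int.floordiv e.2.2.1 2 = 2 ^ m := by
            rw [hsz, PySem.Int.floordiv_eq_ediv_of_pos (by norm_num), pow_succ]
            exact Int.mul_ediv_cancel _ (by norm_num)
          simp only [hhalf]
          have hkids : (([0, (2:Int) ^ m] : List Int).flatMap (fun dx =>
              ([0, (2:Int) ^ m] : List Int).flatMap (fun dy =>
                ([0, (2:Int) ^ m] : List Int).map (fun dz =>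
                  (-(bots_in_cube bots (e.2.2.2.1 + dx) (e.2.2.2.2.1 + dy) (e.2.2.2.2.2 + dz) (2 ^ m)),
                   min_dist_cube_to_origin (e.2.2.2.1 + dx) (e.2.2.2.2.1 + dy) (e.2.2.2.2.2 + dz) (2 ^ m),
                   2 ^ m, e.2.2.2.1 + dx, e.2.2.2.2.1 + dy, e.2.2.2.2.2 + dz))))) =
              ([(-(bots_in_cube bots e.2.2.2.1 e.2.2.2.2.1 e.2.2.2.2.2 (2 ^ m)),
           min_dist_cube_to_origin e.2.2.2.1 e.2.2.2.2.1 e.2.2.2.2.2 (2 ^ m), 2 ^ m, e.2.2.2.1, e.2.2.2.2.1, e.2.2.2.2.2),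
          (-(bots_in_cube bots e.2.2.2.1 e.2.2.2.2.1 (e.2.2.2.2.2 + 2 ^ m) (2 ^ m)),
           min_dist_cube_to_origin e.2.2.2.1 e.2.2.2.2.1 (e.2.2.2.2.2 + 2 ^ m) (2 ^ m), 2 ^ m, e.2.2.2.1, e.2.2.2.2.1, (e.2.2.2.2.2 + 2 ^ m)),
          (-(bots_in_cube bots e.2.2.2.1 (e.2.2.2.2.1 + 2 ^ m) e.2.2.2.2.2 (2 ^ m)),
           min_dist_cube_to_origin e.2.2.2.1 (e.2.2.2.2.1 + 2 ^ m) e.2.2.2.2.2 (2 ^ m), 2 ^ m, e.2.2.2.1, (e.2.2.2.2.1 + 2 ^ m), e.2.2.2.2.2),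
          (-(bots_in_cube bots e.2.2.2.1 (e.2.2.2.2.1 + 2 ^ m) (e.2.2.2.2.2 + 2 ^ m) (2 ^ m)),
           min_dist_cube_to_origin e.2.2.2.1 (e.2.2.2.2.1 + 2 ^ m) (e.2.2.2.2.2 + 2 ^ m) (2 ^ m), 2 ^ m, e.2.2.2.1, (e.2.2.2.2.1 + 2 ^ m), (e.2.2.2.2.2 + 2 ^ m)),
          (-(bots_in_cube bots (e.2.2.2.1 + 2 ^ m) e.2.2.2.2.1 e.2.2.2.2.2 (2 ^ m)),
           min_dist_cube_to_origin (e.2.2.2.1 + 2 ^ m) e.2.2.2.2.1 e.2.2.2.2.2 (2 ^ m), 2 ^ m, (e.2.2.2.1 + 2 ^ m), e.2.2.2.2.1, e.2.2.2.2.2),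
          (-(bots_in_cube bots (e.2.2.2.1 + 2 ^ m) e.2.2.2.2.1 (e.2.2.2.2.2 + 2 ^ m) (2 ^ m)),
           min_dist_cube_to_origin (e.2.2.2.1 + 2 ^ m) e.2.2.2.2.1 (e.2.2.2.2.2 + 2 ^ m) (2 ^ m), 2 ^ m, (e.2.2.2.1 + 2 ^ m), e.2.2.2.2.1, (e.2.2.2.2.2 + 2 ^ m)),
          (-(bots_in_cube bots (e.2.2.2.1 + 2 ^ m) (e.2.2.2.2.1 + 2 ^ m) e.2.2.2.2.2 (2 ^ m)),
           min_dist_cube_to_origin (e.2.2.2.1 + 2 ^ m) (e.2.2.2.2.1 + 2 ^ m) e.2.2.2.2.2 (2 ^ m), 2 ^ m, (e.2.2.2.1 + 2 ^ m), (e.2.2.2.2.1 + 2 ^ m), e.2.2.2.2.2),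
          (-(bots_in_cube bots (e.2.2.2.1 + 2 ^ m) (e.2.2.2.2.1 + 2 ^ m) (e.2.2.2.2.2 + 2 ^ m) (2 ^ m)),
           min_dist_cube_to_origin (e.2.2.2.1 + 2 ^ m) (e.2.2.2.2.1 + 2 ^ m) (e.2.2.2.2.2 + 2 ^ m) (2 ^ m), 2 ^ m, (e.2.2.2.1 + 2 ^ m), (e.2.2.2.2.1 + 2 ^ m), (e.2.2.2.2.2 + 2 ^ m))] :
                List (Int × Int × Int × Int × Int × Int)) := by
            simp [List.flatMap]
          rw [hkids]
          set CH := ([(-(bots_in_cube bots e.2.2.2.1 e.2.2.2.2.1 e.2.2.2.2.2 (2 ^ m)),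
           min_dist_cube_to_origin e.2.2.2.1 e.2.2.2.2.1 e.2.2.2.2.2 (2 ^ m), 2 ^ m, e.2.2.2.1, e.2.2.2.2.1, e.2.2.2.2.2),
          (-(bots_in_cube bots e.2.2.2.1 e.2.2.2.2.1 (e.2.2.2.2.2 + 2 ^ m) (2 ^ m)),
           min_dist_cube_to_origin e.2.2.2.1 e.2.2.2.2.1 (e.2.2.2.2.2 + 2 ^ m) (2 ^ m), 2 ^ m, e.2.2.2.1, e.2.2.2.2.1, (e.2.2.2.2.2 + 2 ^ m)),
          (-(bots_in_cube bots e.2.2.2.1 (e.2.2.2.2.1 + 2 ^ m) e.2.2.2.2.2 (2 ^ m)),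
           min_dist_cube_to_origin e.2.2.2.1 (e.2.2.2.2.1 + 2 ^ m) e.2.2.2.2.2 (2 ^ m), 2 ^ m, e.2.2.2.1, (e.2.2.2.2.1 + 2 ^ m), e.2.2.2.2.2),
          (-(bots_in_cube bots e.2.2.2.1 (e.2.2.2.2.1 + 2 ^ m) (e.2.2.2.2.2 + 2 ^ m) (2 ^ m)),
           min_dist_cube_to_origin e.2.2.2.1 (e.2.2.2.2.1 + 2 ^ m) (e.2.2.2.2.2 + 2 ^ m) (2 ^ m), 2 ^ m, e.2.2.2.1, (e.2.2.2.2.1 + 2 ^ m), (e.2.2.2.2.2 + 2 ^ m)),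
          (-(bots_in_cube bots (e.2.2.2.1 + 2 ^ m) e.2.2.2.2.1 e.2.2.2.2.2 (2 ^ m)),
           min_dist_cube_to_origin (e.2.2.2.1 + 2 ^ m) e.2.2.2.2.1 e.2.2.2.2.2 (2 ^ m), 2 ^ m, (e.2.2.2.1 + 2 ^ m), e.2.2.2.2.1, e.2.2.2.2.2),
          (-(bots_in_cube bots (e.2.2.2.1 + 2 ^ m) e.2.2.2.2.1 (e.2.2.2.2.2 + 2 ^ m) (2 ^ m)),
           min_dist_cube_to_origin (e.2.2.2.1 + 2 ^ m) e.2.2.2.2.1 (e.2.2.2.2.2 + 2 ^ m) (2 ^ m), 2 ^ m, (e.2.2.2.1 + 2 ^ m), e.2.2.2.2.1, (e.2.2.2.2.2 + 2 ^ m)),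
          (-(bots_in_cube bots (e.2.2.2.1 + 2 ^ m) (e.2.2.2.2.1 + 2 ^ m) e.2.2.2.2.2 (2 ^ m)),
           min_dist_cube_to_origin (e.2.2.2.1 + 2 ^ m) (e.2.2.2.2.1 + 2 ^ m) e.2.2.2.2.2 (2 ^ m), 2 ^ m, (e.2.2.2.1 + 2 ^ m), (e.2.2.2.2.1 + 2 ^ m), e.2.2.2.2.2),
          (-(bots_in_cube bots (e.2.2.2.1 + 2 ^ m) (e.2.2.2.2.1 + 2 ^ m) (e.2.2.2.2.2 + 2 ^ m) (2 ^ m)),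
           min_dist_cube_to_origin (e.2.2.2.1 + 2 ^ m) (e.2.2.2.2.1 + 2 ^ m) (e.2.2.2.2.2 + 2 ^ m) (2 ^ m), 2 ^ m, (e.2.2.2.1 + 2 ^ m), (e.2.2.2.2.1 + 2 ^ m), (e.2.2.2.2.2 + 2 ^ m))] :
            List (Int × Int × Int × Int × Int × Int)) with hCH
          have hwfr : ∀ c ∈ rest, pvWFe bots c := fun c hc =>
            hwf c ((hperm.mem_iff).2 (List.mem_cons_of_mem _ hc))
          have hwfc : ∀ c ∈ CH, pvWFe bots c := by
            intro c hc
            rw [hCH] at hc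
            simp only [List.mem_cons, List.not_mem_nil, or_false] at hc
            rcases hc with rfl | rfl | rfl | rfl | rfl | rfl | rfl | rfl <;>
              exact ⟨m, rfl, rfl, rfl⟩
          have hwf' : ∀ c ∈ rest ++ CH, pvWFe bots c := by
            intro c hc
            rcases List.mem_append.1 hc with hc | hc
            · exact hwfr c hc
            · exact hwfc c hc
          have hne' : rest ++ CH ≠ [] := by
            rw [hCH]
            simp
          have hmu' : pvMu (rest ++ CH) ≤ N := by
            have hlt : pvMu (rest ++ CH) < pvMu pq := by
              apply pvMu_pop_lt hp (by omega)
              rw [hhalf, hCH]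
              rfl
            omega
          rw [ih (rest ++ CH) hmu' hne' hwf']
          have hgoal : List.foldl pvMax pvBot ((rest ++ CH).map (pvEB bots)) =
              List.foldl pvMax pvBot (pq.map (pvEB bots)) := by
            have h1 : List.foldl pvMax pvBot (pq.map (pvEB bots)) =
                List.foldl pvMax pvBot ((e :: rest).map (pvEB bots)) :=
              foldl_pvMax_perm (hperm.map _) pvBot
            rw [h1, List.map_cons, List.foldl_cons, List.map_append]
            have h2 : List.foldl pvMax pvBot (rest.map (pvEB bots) ++ CH.map (pvEB bots)) =
                List.foldl pvMax pvBot (CH.map (pvEB bots) ++ rest.map (pvEB bots)) :=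
              foldl_pvMax_perm List.perm_append_comm pvBot
            rw [h2, List.foldl_append]
            have h3 : List.foldl pvMax pvBot (CH.map (pvEB bots)) =
                pvMax pvBot (pvEB bots e) := by
              have hmapCH : CH.map (pvEB bots) =
                  pvBest bots e.2.2.2.1 e.2.2.2.2.1 e.2.2.2.2.2 m ::
                    (CH.tail.map (pvEB bots)) := by
                rw [hCH]
                simp only [List.map_cons, List.map_nil, List.tail_cons, pvEB, pvLogPow]
              rw [hmapCH, List.foldl_cons, foldl_pvMax_init, pvEB_of_wf hsz]
              have h4 : List.foldl pvMax (pvBest bots e.2.2.2.1 e.2.2.2.2.1 e.2.2.2.2.2 m)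
                  (CH.tail.map (pvEB bots)) =
                  pvBest bots e.2.2.2.1 e.2.2.2.2.1 e.2.2.2.2.2 (m + 1) := by
                rw [hCH]
                simp only [List.tail_cons, List.map_cons, List.map_nil, pvEB, pvLogPow]
                rfl
              rw [h4]
            rw [h3]
          rw [hgoal]


-- ===== final glue =====

theorem pvFold6 : ∀ (l : List (Int × Int × Int × Int)) (a1 a2 a3 a4 a5 a6 : Int),
    l.foldl (fun (a : Int × Int × Int × Int × Int × Int) b =>
        (if b.1 < a.1 then b.1 else a.1,
         if a.2.1 < b.1 then b.1 else a.2.1,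
         if b.2.1 < a.2.2.1 then b.2.1 else a.2.2.1,
         if a.2.2.2.1 < b.2.1 then b.2.1 else a.2.2.2.1,
         if b.2.2.1 < a.2.2.2.2.1 then b.2.2.1 else a.2.2.2.2.1,
         if a.2.2.2.2.2 < b.2.2.1 then b.2.2.1 else a.2.2.2.2.2))
      (a1, a2, a3, a4, a5, a6) =
    (List.foldl min a1 (l.map (fun b => b.1)),
     List.foldl max a2 (l.map (fun b => b.1)),
     List.foldl min a3 (l.map (fun b => b.2.1)),
     List.foldl max a4 (l.map (fun b => b.2.1)),
     List.foldl min a5 (l.map (fun b => b.2.2.1)),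
     List.foldl max a6 (l.map (fun b => b.2.2.1))) := by
  intro l
  induction l with
  | nil => intro a1 a2 a3 a4 a5 a6; rfl
  | cons b t ih =>
    intro a1 a2 a3 a4 a5 a6
    simp only [List.foldl_cons, List.map_cons]
    rw [ih]
    have e1 : (if b.1 < a1 then b.1 else a1) = min a1 b.1 := by omega
    have e2 : (if a2 < b.1 then b.1 else a2) = max a2 b.1 := by omega
    have e3 : (if b.2.1 < a3 then b.2.1 else a3) = min a3 b.2.1 := by omega
    have e4 : (if a4 < b.2.1 then b.2.1 else a4) = max a4 b.2.1 := by omega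
    have e5 : (if b.2.2.1 < a5 then b.2.2.1 else a5) = min a5 b.2.2.1 := by omega
    have e6 : (if a6 < b.2.2.1 then b.2.2.1 else a6) = max a6 b.2.2.1 := by omega
    rw [e1, e2, e3, e4, e5, e6]

theorem grow_eq_aux : ∀ (n : Nat) (span s : Int), (span - s).toNat ≤ n →
    growA span s = growB span s := by
  intro n
  induction n with
  | zero =>
    intro span s h
    rw [growA, growB]
    have : ¬ (s < span) := by omega
    rw [dif_neg this, dif_neg this]
  | succ n ih =>
    intro span s h
    rw [growA, growB]
    by_cases h1 : s < span
    · rw [dif_pos h1, dif_pos h1]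
      by_cases h2 : s < 1
      · rw [dif_pos h2, dif_pos h2]
      · rw [dif_neg h2, dif_neg h2]
        exact ih span (2 * s) (by omega)
    · rw [dif_neg h1, dif_neg h1]

theorem grow_eq (span s : Int) : growA span s = growB span s :=
  grow_eq_aux (span - s).toNat span s le_rfl

theorem growA_pow_aux : ∀ (n : Nat) (span s : Int), (span - s).toNat ≤ n →
    (∃ k : Nat, s = 2 ^ k) → ∃ k : Nat, growA span s = 2 ^ k := by
  intro n
  induction n with
  | zero =>
    intro span s h hk
    rw [growA]
    have : ¬ (s < span) := by omega
    rw [dif_neg this]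
    exact hk
  | succ n ih =>
    intro span s h hk
    rw [growA]
    by_cases h1 : s < span
    · rw [dif_pos h1]
      by_cases h2 : s < 1
      · rw [dif_pos h2]
        exact hk
      · rw [dif_neg h2]
        apply ih span (2 * s) (by omega)
        obtain ⟨k, rfl⟩ := hk
        exact ⟨k + 1, by rw [pow_succ]; ring⟩
    · rw [dif_neg h1]
      exact hk

theorem growA_pow (span s : Int) (hk : ∃ k : Nat, s = 2 ^ k) :
    ∃ k : Nat, growA span s = 2 ^ k :=
  growA_pow_aux (span - s).toNat span s le_rfl hk

theorem final_step (bots : List (Int × Int × Int × Int)) (mnx mny mnz sz : Int)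
    (k : Nat) (hsz : sz = 2 ^ k) :
    loopA bots [(-(bots_in_cube bots mnx mny mnz sz),
      min_dist_cube_to_origin mnx mny mnz sz, sz, mnx, mny, mnz)] =
    (match dfsB bots mnx mny mnz sz none with
     | some p => p.2
     | none => 0) := by
  subst hsz
  rw [dfsB_eq bots k mnx mny mnz none]
  rw [loopA_eq bots (pvMu [(-(bots_in_cube bots mnx mny mnz (2 ^ k)),
      min_dist_cube_to_origin mnx mny mnz (2 ^ k), 2 ^ k, mnx, mny, mnz)]) _ le_rfl
      (by simp)
      (by
        intro c hc
        simp only [List.mem_cons, List.not_mem_nil, or_false] at hc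
        subst hc
        exact ⟨k, rfl, rfl, rfl⟩)]
  rw [List.map_cons, List.map_nil, List.foldl_cons, List.foldl_nil]
  have hEB : pvEB bots (-(bots_in_cube bots mnx mny mnz (2 ^ k)),
      min_dist_cube_to_origin mnx mny mnz (2 ^ k), 2 ^ k, mnx, mny, mnz) =
      pvBest bots mnx mny mnz k := by
    exact pvEB_of_wf rfl
  rw [hEB, pvMax_bot (pvBest_count_nonneg bots k mnx mny mnz)]
  rfl

theorem solve_eq_alt : ∀ (bots : List (Int × Int × Int × Int)), bots ≠ [] →
    solve bots = solve_alt bots := by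
  intro bots hne
  cases bots with
  | nil => exact absurd rfl hne
  | cons b0 rest =>
    have kmin1 : (PySem.List.min? (List.map (fun b : Int × Int × Int × Int => b.1)
        (b0 :: rest)) (fun v => v)).getD 0 =
        List.foldl min b0.1 (List.map (fun b : Int × Int × Int × Int => b.1) rest) := by
      rw [List.map_cons, PySem.List.min?_id_cons, Option.getD_some]
    have kmax1 : (PySem.List.max? (List.map (fun b : Int × Int × Int × Int => b.1)
        (b0 :: rest)) (fun v => v)).getD 0 =
        List.foldl max b0.1 (List.map (fun b : Int × Int × Int × Int => b.1) rest) := by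
      rw [List.map_cons, PySem.List.max?_id_cons, Option.getD_some]
    have kmin2 : (PySem.List.min? (List.map (fun b : Int × Int × Int × Int => b.2.1)
        (b0 :: rest)) (fun v => v)).getD 0 =
        List.foldl min b0.2.1 (List.map (fun b : Int × Int × Int × Int => b.2.1) rest) := by
      rw [List.map_cons, PySem.List.min?_id_cons, Option.getD_some]
    have kmax2 : (PySem.List.max? (List.map (fun b : Int × Int × Int × Int => b.2.1)
        (b0 :: rest)) (fun v => v)).getD 0 =
        List.foldl max b0.2.1 (List.map (fun b : Int × Int × Int × Int => b.2.1) rest) := by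
      rw [List.map_cons, PySem.List.max?_id_cons, Option.getD_some]
    have kmin3 : (PySem.List.min? (List.map (fun b : Int × Int × Int × Int => b.2.2.1)
        (b0 :: rest)) (fun v => v)).getD 0 =
        List.foldl min b0.2.2.1 (List.map (fun b : Int × Int × Int × Int => b.2.2.1) rest) := by
      rw [List.map_cons, PySem.List.min?_id_cons, Option.getD_some]
    have kmax3 : (PySem.List.max? (List.map (fun b : Int × Int × Int × Int => b.2.2.1)
        (b0 :: rest)) (fun v => v)).getD 0 =
        List.foldl max b0.2.2.1 (List.map (fun b : Int × Int × Int × Int => b.2.2.1) rest) := by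
      rw [List.map_cons, PySem.List.max?_id_cons, Option.getD_some]
    have fmin1 : List.foldl min b0.1 (List.map (fun b : Int × Int × Int × Int => b.1)
        (b0 :: rest)) =
        List.foldl min b0.1 (List.map (fun b : Int × Int × Int × Int => b.1) rest) := by
      rw [List.map_cons, List.foldl_cons, min_self]
    have fmax1 : List.foldl max b0.1 (List.map (fun b : Int × Int × Int × Int => b.1)
        (b0 :: rest)) =
        List.foldl max b0.1 (List.map (fun b : Int × Int × Int × Int => b.1) rest) := by
      rw [List.map_cons, List.foldl_cons, max_self]
    have fmin2 : List.foldl min b0.2.1 (List.map (fun b : Int × Int × Int × Int => b.2.1)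
        (b0 :: rest)) =
        List.foldl min b0.2.1 (List.map (fun b : Int × Int × Int × Int => b.2.1) rest) := by
      rw [List.map_cons, List.foldl_cons, min_self]
    have fmax2 : List.foldl max b0.2.1 (List.map (fun b : Int × Int × Int × Int => b.2.1)
        (b0 :: rest)) =
        List.foldl max b0.2.1 (List.map (fun b : Int × Int × Int × Int => b.2.1) rest) := by
      rw [List.map_cons, List.foldl_cons, max_self]
    have fmin3 : List.foldl min b0.2.2.1 (List.map (fun b : Int × Int × Int × Int => b.2.2.1)
        (b0 :: rest)) =
        List.foldl min b0.2.2.1 (List.map (fun b : Int × Int × Int × Int => b.2.2.1) rest) := by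
      rw [List.map_cons, List.foldl_cons, min_self]
    have fmax3 : List.foldl max b0.2.2.1 (List.map (fun b : Int × Int × Int × Int => b.2.2.1)
        (b0 :: rest)) =
        List.foldl max b0.2.2.1 (List.map (fun b : Int × Int × Int × Int => b.2.2.1) rest) := by
      rw [List.map_cons, List.foldl_cons, max_self]
    simp only [solve, solve_alt]
    rw [pvFold6]
    rw [kmin1, kmax1, kmin2, kmax2, kmin3, kmax3, fmin1, fmax1, fmin2, fmax2, fmin3, fmax3]
    rw [← grow_eq]
    obtain ⟨k, hk⟩ := growA_pow
      (max (max (List.foldl max b0.1 (List.map (fun b : Int × Int × Int × Int => b.1) rest) -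
          List.foldl min b0.1 (List.map (fun b : Int × Int × Int × Int => b.1) rest) + 1)
        (List.foldl max b0.2.1 (List.map (fun b : Int × Int × Int × Int => b.2.1) rest) -
          List.foldl min b0.2.1 (List.map (fun b : Int × Int × Int × Int => b.2.1) rest) + 1))
        (List.foldl max b0.2.2.1 (List.map (fun b : Int × Int × Int × Int => b.2.2.1) rest) -
          List.foldl min b0.2.2.1 (List.map (fun b : Int × Int × Int × Int => b.2.2.1) rest) + 1))
      1 ⟨0, by norm_num⟩
    exact final_step (b0 :: rest) _ _ _ _ k hk

-- ===== VERDICT (by name: the statement is the Claim_ definition above) =====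
theorem solve_spec : Claim_equal_solve := by
  intro bots _ hpre
  exact solve_eq_alt bots hpre
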